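-- pv_equiv track=rewrite | github.com/kensekense/Masters-Thesis | src/ltl.py | until_N
-- ===== SOURCE A (Python) =====
-- def count_label (sub, labels):
--     assert type(sub) == list
--     assert type(labels) == list
--
--     count = 0
--     for item in sub:
--         if item not in labels:
--             count += 1
--     return count
--
-- def until_N (trace, x, y, N):
--
--     assert type(trace) == list
--     assert type(x) == list
--     assert type(y) == list
--
--     sol = []
--     current = N
--     s = -1
--     e = -1
--     for i in range(len(trace)):
--
--         if (trace[i] in x) and e == -1 and s == -1: #finding first instance of x
--             s = i
--
--         if (s != -1) and (trace[i] not in x) and (trace[i] not in y): #started count and violates Until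
--
--             if current <= 0: #no more N to give
--                 s = -1
--                 e = -1
--                 current = N
--                 continue #search for next
--
--             else: #more N to give, decrement
--                 current -= 1
--
--         if s != -1 and (trace[i] in y): #found instance of y and x
--             e = i
--             sol.append((s,e, count_label(trace[s:e],x), e-s)) #append starting and ending index, with number of appearances of x
--             s = -1
--             e = -1
--
--     return sol
-- ===== SOURCE B (Python) =====
-- def until_N(trace, x, y, N):
--     # One pass with O(1) membership (sets) and a running count of non-x elements,
--     # so count_label's rescan of trace[s:e] disappears.
--     xs = set(x)
--     ys = set(y)
--     sol = []
--     budget = N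
--     s = -1
--     base = 0
--     nonx = 0
--     for i, t in enumerate(trace):
--         inx = t in xs
--         iny = t in ys
--         if s < 0:
--             if inx:
--                 s = i
--                 base = nonx
--         elif not inx and not iny:
--             if budget <= 0:
--                 s = -1
--                 budget = N
--             else:
--                 budget -= 1
--         if s >= 0 and iny:
--             sol.append((s, i, nonx - base, i - s))
--             s = -1
--         if not inx:
--             nonx += 1
--     return sol
-- ===== Notes on version B (the rewrite author's own statement) =====
-- stated objective: faster
-- what changed: B replaces A's per-match rescan count_label(trace[s:e], x) by a single running count of non-x elements (each interval's count is a difference of two snapshots) and replaces list membership tests by set membership, making one O(1)-per-element pass.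
import Mathlib
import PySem

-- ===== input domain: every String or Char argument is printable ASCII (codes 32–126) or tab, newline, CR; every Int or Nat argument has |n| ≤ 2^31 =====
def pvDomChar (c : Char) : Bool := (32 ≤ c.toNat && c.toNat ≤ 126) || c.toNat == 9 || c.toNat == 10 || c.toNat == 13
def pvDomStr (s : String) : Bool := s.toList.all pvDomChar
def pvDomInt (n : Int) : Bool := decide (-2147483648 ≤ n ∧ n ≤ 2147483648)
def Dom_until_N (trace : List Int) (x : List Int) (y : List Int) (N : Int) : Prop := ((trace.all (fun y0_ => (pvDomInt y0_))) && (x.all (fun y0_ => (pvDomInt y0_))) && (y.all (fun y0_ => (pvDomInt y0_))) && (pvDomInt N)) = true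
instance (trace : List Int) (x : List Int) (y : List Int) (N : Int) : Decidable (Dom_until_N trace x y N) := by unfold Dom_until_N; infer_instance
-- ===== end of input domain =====

-- B replaces A's per-match rescan count_label(trace[s:e], x) by a running count of
-- non-x elements (interval count = difference of two snapshots) and set membership:
-- one pass, O(1) work per element.  Objective: faster (asymptotic).

-- ===== PORT A =====
def count_label (sub : List Int) (labels : List Int) : Int :=
  sub.foldl (fun count item => if !(labels.contains item) then count + 1 else count) 0

-- one iteration of A's for-loop; state = (sol, current, s, e)
def untilNStepA (trace : List Int) (x : List Int) (y : List Int) (N : Int)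
    (st : List (Int × Int × Int × Int) × Int × Int × Int) (i : Int) :
    List (Int × Int × Int × Int) × Int × Int × Int :=
  let sol := st.1
  let current := st.2.1
  let s := st.2.2.1
  let e := st.2.2.2
  let t := PySem.List.pyGetD trace i 0  -- i comes from range(len(trace)): always in range
  let s := if x.contains t && e == -1 && s == -1 then i else s
  if s != -1 && !(x.contains t) && !(y.contains t) then
    if current ≤ 0 then (sol, N, -1, -1)          -- reset, then 'continue'
    else
      let current := current - 1
      if s != -1 && y.contains t then
        (sol ++ [(s, i, count_label (PySem.List.slice trace (some s) (some i)) x, i - s)], current, -1, -1)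
      else (sol, current, s, e)
  else
    if s != -1 && y.contains t then
      (sol ++ [(s, i, count_label (PySem.List.slice trace (some s) (some i)) x, i - s)], current, -1, -1)
    else (sol, current, s, e)

def until_N (trace : List Int) (x : List Int) (y : List Int) (N : Int) : List (Int × Int × Int × Int) :=
  ((PySem.List.pyRange 0 (PySem.List.len trace) 1).foldl (untilNStepA trace x y N) ([], N, -1, -1)).1

-- ===== PORT B =====
-- one iteration of B's for-loop; state = (sol, budget, s, base, nonx)
def untilNStepB (xs : PySem.Set Int) (ys : PySem.Set Int) (N : Int)
    (st : List (Int × Int × Int × Int) × Int × Int × Int × Int) (p : Int × Int) :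
    List (Int × Int × Int × Int) × Int × Int × Int × Int :=
  let sol := st.1
  let budget := st.2.1
  let s := st.2.2.1
  let base := st.2.2.2.1
  let nonx := st.2.2.2.2
  let i := p.1
  let t := p.2
  let inx := PySem.Set.contains xs t
  let iny := PySem.Set.contains ys t
  let bs : Int × Int × Int :=
    if s < 0 then (if inx then (budget, i, nonx) else (budget, s, base))
    else if !inx && !iny then
      (if budget ≤ 0 then (N, -1, base) else (budget - 1, s, base))
    else (budget, s, base)
  let budget := bs.1
  let s := bs.2.1
  let base := bs.2.2
  let ss : List (Int × Int × Int × Int) × Int :=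
    if s ≥ 0 && iny then (sol ++ [(s, i, nonx - base, i - s)], -1) else (sol, s)
  let sol := ss.1
  let s := ss.2
  let nonx := if !inx then nonx + 1 else nonx
  (sol, budget, s, base, nonx)

def until_N_alt (trace : List Int) (x : List Int) (y : List Int) (N : Int) : List (Int × Int × Int × Int) :=
  let xs : PySem.Set Int := PySem.Set.ofList x
  let ys : PySem.Set Int := PySem.Set.ofList y
  ((PySem.List.enumerate trace 0).foldl (untilNStepB xs ys N) ([], N, -1, 0, 0)).1

-- ===== PRECONDITION & SPEC =====
def Spec_until_N (trace : List Int) (x : List Int) (y : List Int) (N : Int) (out : List (Int × Int × Int × Int)) : Prop := out = until_N_alt trace x y N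
instance (trace : List Int) (x : List Int) (y : List Int) (N : Int) (out : List (Int × Int × Int × Int)) : Decidable (Spec_until_N trace x y N out) := by unfold Spec_until_N; infer_instance

-- ===== CLAIM (what is proved, stated in full; the proofs are below) =====
def Claim_equal_until_N : Prop := ∀ (trace : List Int) (x : List Int) (y : List Int) (N : Int), Dom_until_N trace x y N → Spec_until_N trace x y N (until_N trace x y N)

-- ===== LEMMAS AND PROOFS =====

-- prefix count of the elements of tr[:k] that are not in x
def pvP (tr : List Int) (x : List Int) (k : Nat) : Int :=
  ((tr.take k).countP (fun t => !(x.contains t)) : Int)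

-- the simulation invariant between A's loop state and B's loop state after k iterations
def pvInv (tr : List Int) (x : List Int) (k : Nat)
    (stA : List (Int × Int × Int × Int) × Int × Int × Int)
    (stB : List (Int × Int × Int × Int) × Int × Int × Int × Int) : Prop :=
  stA.1 = stB.1 ∧ stA.2.1 = stB.2.1 ∧ stA.2.2.1 = stB.2.2.1 ∧ stA.2.2.2 = -1 ∧
  stB.2.2.2.2 = pvP tr x k ∧
  (stA.2.2.1 = -1 ∨ ∃ m : Nat, stA.2.2.1 = (m : Int) ∧ m ≤ k ∧ stB.2.2.2.1 = pvP tr x m)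

lemma contains_ofList_eq (x : List Int) (t : Int) :
    PySem.Set.contains (PySem.Set.ofList x) t = x.contains t := by
  rw [PySem.Set.contains_eq_listContains, Bool.eq_iff_iff]
  simp [PySem.Set.mem_ofList]

lemma count_label_eq_countP (sub labels : List Int) :
    count_label sub labels = ((sub.countP (fun t => !(labels.contains t))) : Int) := by
  unfold count_label
  rw [PySem.List.foldl_count_if]
  ring

lemma count_slice (tr x : List Int) (m k : Nat) (hmk : m ≤ k) :
    count_label (PySem.List.slice tr (some (m : Int)) (some (k : Int))) x
      = pvP tr x k - pvP tr x m := by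
  rw [PySem.List.slice_natCast, count_label_eq_countP]
  unfold pvP
  have h : tr.take k = tr.take m ++ (tr.drop m).take (k - m) := by
    rw [← List.take_add]
    congr 1
    omega
  rw [h, List.countP_append]
  push_cast
  ring

lemma pvP_succ (tr x : List Int) (k : Nat) (hk : k < tr.length) :
    pvP tr x (k + 1) = pvP tr x k + (if x.contains (tr.getD k 0) then 0 else 1) := by
  unfold pvP
  rw [List.take_add_one, List.countP_append]
  have h : tr[k]? = some (tr[k]'hk) := List.getElem?_eq_getElem hk
  rw [List.getD, h]
  by_cases hx : x.contains (tr[k]'hk) <;> simp [hx]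

lemma step_sim (tr x y : List Int) (N : Int) (k : Nat) (hk : k < tr.length)
    (stA : List (Int × Int × Int × Int) × Int × Int × Int)
    (stB : List (Int × Int × Int × Int) × Int × Int × Int × Int)
    (h : pvInv tr x k stA stB) :
    pvInv tr x (k + 1) (untilNStepA tr x y N stA (k : Int))
      (untilNStepB (PySem.Set.ofList x) (PySem.Set.ofList y) N stB ((k : Int), PySem.List.pyGetD tr (k : Int) 0)) := by
  obtain ⟨sol, cur, s, e⟩ := stA
  obtain ⟨sol', bud, s', base, nonx⟩ := stB
  obtain ⟨h1, h2, h3, h4, h5, h6⟩ := h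
  simp only at h1 h2 h3 h4 h5 h6
  subst h1 h2 h3 h4 h5
  unfold untilNStepA untilNStepB
  simp only [contains_ofList_eq]
  have htg : PySem.List.pyGetD tr ((k:Int)) 0 = tr.getD k 0 := by simp
  have hgd : tr.getD k 0 = tr[k]?.getD 0 := List.getD_eq_getElem?_getD
  rcases h6 with hs | ⟨m, hm, hmk, hbase⟩
  · subst hs
    by_cases hx : tr[k]?.getD 0 ∈ x
    · have hxb : x.contains (tr.getD k 0) = true := by simpa [hgd] using hx
      by_cases hy : tr[k]?.getD 0 ∈ y
      · have hyb : y.contains (tr.getD k 0) = true := by simpa [hgd] using hy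
        simp only [htg, hxb, hyb]
        simp [pvInv, count_slice tr x k k le_rfl, pvP_succ tr x k hk, hx]
      · have hyb : y.contains (tr.getD k 0) = false := by simpa [hgd] using hy
        simp only [htg, hxb, hyb]
        simp [pvInv, pvP_succ tr x k hk, hx]
    · have hxb : x.contains (tr.getD k 0) = false := by simpa [hgd] using hx
      simp only [htg, hxb]
      simp [pvInv, pvP_succ tr x k hk, hx]
  · subst hm
    have hm0 : ¬ ((m:Int) = -1) := by omega
    have hm1 : ¬ ((m:Int) < 0) := by omega
    by_cases hx : tr[k]?.getD 0 ∈ x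
    · have hxb : x.contains (tr.getD k 0) = true := by simpa [hgd] using hx
      by_cases hy : tr[k]?.getD 0 ∈ y
      · have hyb : y.contains (tr.getD k 0) = true := by simpa [hgd] using hy
        simp only [htg, hxb, hyb]
        simp [pvInv, hm0, hm1, count_slice tr x m k hmk, pvP_succ tr x k hk, hx, hbase]
      · have hyb : y.contains (tr.getD k 0) = false := by simpa [hgd] using hy
        simp only [htg, hxb, hyb]
        simp [pvInv, hm0, hm1, pvP_succ tr x k hk, hx, hbase]
        omega
    · have hxb : x.contains (tr.getD k 0) = false := by simpa [hgd] using hx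
      by_cases hy : tr[k]?.getD 0 ∈ y
      · have hyb : y.contains (tr.getD k 0) = true := by simpa [hgd] using hy
        simp only [htg, hxb, hyb]
        simp [pvInv, hm0, hm1, count_slice tr x m k hmk, pvP_succ tr x k hk, hx, hbase]
      · have hyb : y.contains (tr.getD k 0) = false := by simpa [hgd] using hy
        simp only [htg, hxb, hyb]
        by_cases hc : cur ≤ 0
        · simp [pvInv, hm0, hm1, hc, pvP_succ tr x k hk, hx]
        · simp [pvInv, hm0, hm1, hc, pvP_succ tr x k hk, hx, hbase]
          omega

lemma fold_sim (tr x y : List Int) (N : Int) (k : Nat) (hk : k ≤ tr.length) :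
    pvInv tr x k
      ((PySem.List.pyRange 0 (k : Int) 1).foldl (untilNStepA tr x y N) ([], N, -1, -1))
      ((PySem.List.pyRange 0 (k : Int) 1).foldl
        (fun st j => untilNStepB (PySem.Set.ofList x) (PySem.Set.ofList y) N st (j, PySem.List.pyGetD tr j 0))
        ([], N, -1, 0, 0)) := by
  induction k with
  | zero =>
    simp only [Nat.cast_zero]
    rw [PySem.List.pyRange_one_eq_nil (a := 0) (b := 0) (le_refl (0:Int))]
    simp [pvInv, pvP]
  | succ k ih =>
    have hr : PySem.List.pyRange 0 ((k + 1 : Nat) : Int) 1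
        = PySem.List.pyRange 0 (k : Int) 1 ++ [(k : Int)] := by
      push_cast
      exact PySem.List.pyRange_one_succ_right (by positivity)
    rw [hr, List.foldl_append, List.foldl_append]
    simp only [List.foldl_cons, List.foldl_nil]
    exact step_sim tr x y N k (by omega) _ _ (ih (by omega))

-- ===== VERDICT (by name: the statement is the Claim_ definition above) =====
theorem until_N_spec : Claim_equal_until_N := by
  intro trace x y N _
  show ((PySem.List.pyRange 0 (PySem.List.len trace) 1).foldl (untilNStepA trace x y N) ([], N, -1, -1)).1
      = ((PySem.List.enumerate trace 0).foldl
          (untilNStepB (PySem.Set.ofList x) (PySem.Set.ofList y) N) ([], N, -1, 0, 0)).1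
  rw [PySem.List.enumerate_eq_map_pyRange trace 0, List.foldl_map]
  simp only [PySem.List.len_eq]
  exact (fold_sim trace x y N trace.length le_rfl).1
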